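-- pv_equiv track=rewrite | github.com/pypi-data/pypi-mirror-249 | packages/fortran2cc2fortran/fortran2cc2fortran-0.10.tar.gz/fortran2cc2fortran-0.10/fortran2cc2fortran/__init__.py | calculate_flat_index_f
-- ===== SOURCE A (Python) =====
-- def calculate_flat_index_f(nested_index, array_shape):
--     r"""
--     Calculate the flat index from a given nested index in Fortran order.
--
--     Parameters:
--     - nested_index (list): Nested index in Fortran order.
--     - array_shape (tuple): Shape of the original array.
--
--     Returns:
--     - int: Flat index corresponding to the nested index in Fortran order.
--     """
--     maxind = len(nested_index) - 1
--     array_shape_len = len(array_shape)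
--     wholeindex = nested_index[maxind]
--     for y in range(maxind):
--         tmpda = nested_index[y]
--         for x in range(y + 1, array_shape_len):
--             tmpda = tmpda * array_shape[x]
--         wholeindex = wholeindex + tmpda
--     return wholeindex
-- ===== SOURCE B (Python) =====
-- def calculate_flat_index_f(nested_index, array_shape):
--     # Precompute suffix products of array_shape once (suffix[i] = product of array_shape[i:]),
--     # then a single-pass dot product. O(n+m) instead of A's O(n*m) nested loops.
--     suffix = [1]
--     for s in reversed(array_shape):
--         suffix.insert(0, s * suffix[0])
--     k = len(array_shape)
--     total = nested_index[-1]
--     for y in range(len(nested_index) - 1):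
--         total += nested_index[y] * suffix[min(y + 1, k)]
--     return total
-- ===== Notes on version B (the rewrite author's own statement) =====
-- stated objective: faster
-- what changed: Replaces the nested loop (recomputing the product of a shape suffix for every index position) with suffix products of array_shape computed once back-to-front, followed by a single-pass dot product.
-- outside the precondition, e.g. on calculate_flat_index_f([], (3, 4)): A raises IndexError, B raises IndexError
import Mathlib
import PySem

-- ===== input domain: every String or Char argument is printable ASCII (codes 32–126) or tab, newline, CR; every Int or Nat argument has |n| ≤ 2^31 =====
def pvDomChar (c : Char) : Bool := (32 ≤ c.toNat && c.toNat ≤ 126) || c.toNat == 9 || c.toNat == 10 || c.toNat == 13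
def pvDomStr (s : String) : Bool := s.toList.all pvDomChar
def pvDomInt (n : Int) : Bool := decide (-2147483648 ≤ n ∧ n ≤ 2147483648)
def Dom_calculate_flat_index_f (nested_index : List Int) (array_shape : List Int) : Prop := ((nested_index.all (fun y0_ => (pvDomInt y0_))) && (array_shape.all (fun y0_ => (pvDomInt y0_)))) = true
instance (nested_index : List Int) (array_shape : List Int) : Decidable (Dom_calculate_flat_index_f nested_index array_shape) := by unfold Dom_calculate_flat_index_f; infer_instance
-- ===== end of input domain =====

-- B replaces A's nested loop with suffix products of array_shape computed once plus a
-- single-pass dot product (objective: faster, asymptotic O(n*m) -> O(n+m)).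


-- ===== PORT A =====
-- Literal port of A. Indices y (0 ≤ y < maxind < len nested_index) and x
-- (y+1 ≤ x < len array_shape) are always in range, so getD is exact for
-- nested_index[y] / array_shape[x]; nested_index[maxind] uses pyGet? (raises on []).
def calculate_flat_index_f (nested_index : List Int) (array_shape : List Int) : Int :=
  let maxind : Nat := nested_index.length - 1
  let array_shape_len := array_shape.length
  let wholeindex := (PySem.List.pyGet? nested_index ((nested_index.length : Int) - 1)).getD 0
  (List.range maxind).foldl
    (fun wholeindex y =>
      let tmpda :=
        (List.range' (y + 1) (array_shape_len - (y + 1))).foldl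
          (fun tmpda x => tmpda * array_shape.getD x 0)
          (nested_index.getD y 0)
      wholeindex + tmpda)
    wholeindex

-- ===== PORT B =====
-- suffix list built back-to-front: suffixProds shape = [prod shape[0:], prod shape[1:], …, 1]
def suffixProds (shape : List Int) : List Int :=
  shape.foldr (fun s acc => (s * acc.headD 1) :: acc) [1]

def calculate_flat_index_f_alt (nested_index : List Int) (array_shape : List Int) : Int :=
  let suffix := suffixProds array_shape
  let k := array_shape.length
  let total := (PySem.List.pyGet? nested_index (-1)).getD 0
  (List.range (nested_index.length - 1)).foldl
    (fun total y => total + nested_index.getD y 0 * suffix.getD (min (y + 1) k) 1)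
    total

-- ===== PRECONDITION & SPEC =====
-- Pre_ excludes the empty nested_index, on which A raises IndexError (nested_index[-1]).
def Pre_calculate_flat_index_f (nested_index : List Int) (array_shape : List Int) : Prop :=
  nested_index ≠ []
instance (nested_index : List Int) (array_shape : List Int) : Decidable (Pre_calculate_flat_index_f nested_index array_shape) := by unfold Pre_calculate_flat_index_f; infer_instance

def pvWitness_calculate_flat_index_f : List Int × List Int := ([2, 3], [4, 5])

def Spec_calculate_flat_index_f (nested_index : List Int) (array_shape : List Int) (out : Int) : Prop := out = calculate_flat_index_f_alt nested_index array_shape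
instance (nested_index : List Int) (array_shape : List Int) (out : Int) : Decidable (Spec_calculate_flat_index_f nested_index array_shape out) := by unfold Spec_calculate_flat_index_f; infer_instance

-- ===== CLAIM (what is proved, stated in full; the proofs are below) =====
def Claim_equal_calculate_flat_index_f : Prop := ∀ (nested_index : List Int) (array_shape : List Int), Dom_calculate_flat_index_f nested_index array_shape → Pre_calculate_flat_index_f nested_index array_shape → Spec_calculate_flat_index_f nested_index array_shape (calculate_flat_index_f nested_index array_shape)

-- ===== LEMMAS AND PROOFS =====

theorem headD_eq_getD_zero {α : Type} (l : List α) (d : α) : l.headD d = l.getD 0 d := by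
  cases l <;> rfl

theorem suffixProds_getD (as : List Int) (m : Nat) :
    (suffixProds as).getD m 1 = (as.drop m).prod := by
  induction as generalizing m with
  | nil => cases m <;> simp [suffixProds, List.getD]
  | cons a t ih =>
    cases m with
    | zero =>
      have h0 := ih 0
      simp only [suffixProds, List.foldr_cons, List.getD, List.getElem?_cons_zero,
        Option.getD_some] at *
      rw [headD_eq_getD_zero]
      simp [List.getD] at h0 ⊢
      rw [h0]
      simp
    | succ n =>
      have := ih n
      simp only [suffixProds, List.foldr_cons] at *
      simpa [List.getD] using this

theorem inner_fold_eq (as : List Int) (n s : Nat) (t : Int) (h : n = as.length - s) :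
    (List.range' s n).foldl (fun tmpda x => tmpda * as.getD x 0) t
      = t * (as.drop s).prod := by
  induction n generalizing s t with
  | zero =>
    have : as.length ≤ s := by omega
    simp [List.drop_eq_nil_of_le this]
  | succ n ih =>
    have hs : s < as.length := by omega
    rw [List.range'_succ, List.foldl_cons]
    rw [ih (s + 1) _ (by omega)]
    have hdrop : as.drop s = as[s] :: as.drop (s + 1) := List.drop_eq_getElem_cons hs
    rw [hdrop, List.prod_cons, List.getD_eq_getElem as 0 hs]
    ring

theorem init_eq (ni : List Int) (h : ni ≠ []) :
    (PySem.List.pyGet? ni ((ni.length : Int) - 1)).getD 0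
      = (PySem.List.pyGet? ni (-1)).getD 0 := by
  rw [PySem.List.pyGet?_neg_one]
  have hlen : 0 < ni.length := List.length_pos_iff.mpr h
  have : ((ni.length : Int) - 1) = ((ni.length - 1 : Nat) : Int) := by omega
  rw [this, PySem.List.pyGet?_natCast]
  rw [List.getLast?_eq_getElem?]

-- ===== VERDICT (by name: the statement is the Claim_ definition above) =====
theorem calculate_flat_index_f_spec : Claim_equal_calculate_flat_index_f := by
  intro ni as _ hpre
  unfold Spec_calculate_flat_index_f calculate_flat_index_f calculate_flat_index_f_alt
  simp only []
  rw [init_eq ni hpre]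
  apply PySem.List.foldl_congr_mem
  intro w y _
  rw [inner_fold_eq as (as.length - (y + 1)) (y + 1) _ rfl]
  rw [suffixProds_getD]
  congr 1
  by_cases hy : y + 1 ≤ as.length
  · rw [min_eq_left hy]
  · rw [min_eq_right (by omega)]
    rw [List.drop_eq_nil_of_le (by omega), List.drop_length]
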